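-- pv_equiv track=rewrite | github.com/SeismicSource/seiscat | seiscat/database/dbfunctions.py | _keep_latest_version
-- ===== SOURCE A (Python) =====
-- def _keep_latest_version(rows, fields):
--     """
--     Keep only the latest version of each event in the list of rows.
--
--     :param rows: list of rows
--     :param fields: list of fields
--
--     :returns: list of kept rows
--     """
--     evid_index = fields.index('evid')
--     ver_index = fields.index('ver')
--     evids = set()
--     rows_to_keep = []
--     for row in sorted(
--         rows, key=lambda r: (r[evid_index], r[ver_index]), reverse=True
--     ):
--         evid = row[evid_index]
--         if evid not in evids:
--             rows_to_keep.append(row)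
--             evids.add(evid)
--     return rows_to_keep
-- ===== SOURCE B (Python) =====
-- def _keep_latest_version(rows, fields):
--     """
--     Keep only the latest version of each event in the list of rows.
--
--     :param rows: list of rows
--     :param fields: list of fields
--
--     :returns: list of kept rows
--     """
--     evid_index = fields.index('evid')
--     ver_index = fields.index('ver')
--     best = {}
--     for row in rows:
--         evid = row[evid_index]
--         cur = best.get(evid)
--         if cur is None or cur[ver_index] < row[ver_index]:
--             best[evid] = row
--     return sorted(best.values(), key=lambda r: r[evid_index], reverse=True)
-- ===== Notes on version B (the rewrite author's own statement) =====
-- stated objective: alternative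
-- what changed: A sorts all rows by (evid, ver) descending and then filters first occurrences with a seen-set; B makes a single dict pass keeping the strictly-best (max ver, first wins on ties) row per evid and only sorts the kept rows by evid descending.
import Mathlib
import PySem

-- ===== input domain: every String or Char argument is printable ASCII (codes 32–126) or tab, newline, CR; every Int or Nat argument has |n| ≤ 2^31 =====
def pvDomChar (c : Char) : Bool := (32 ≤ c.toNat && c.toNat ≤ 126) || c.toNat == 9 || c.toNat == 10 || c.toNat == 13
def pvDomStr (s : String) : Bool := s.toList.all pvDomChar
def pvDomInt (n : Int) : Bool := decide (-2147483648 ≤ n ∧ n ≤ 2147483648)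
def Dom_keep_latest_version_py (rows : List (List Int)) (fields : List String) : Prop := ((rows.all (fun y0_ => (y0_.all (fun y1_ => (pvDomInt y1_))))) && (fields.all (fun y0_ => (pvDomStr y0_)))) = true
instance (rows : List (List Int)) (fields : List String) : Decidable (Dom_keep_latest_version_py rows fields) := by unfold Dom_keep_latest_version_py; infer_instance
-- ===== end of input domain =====

-- B replaces A's full sort + first-occurrence filter by a single dict pass keeping the best
-- (strictly larger ver wins) row per evid, then sorts only the kept rows (objective: alternative).

-- ===== PORT A =====
-- row[i] is ported as List.getD (i : Nat) 0 — exact here because i = fields.index(...) ≥ 0 and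
-- Pre_ guarantees i < row.length for every row.
def keep_latest_version_py (rows : List (List Int)) (fields : List String) : List (List Int) :=
  let evid_index := (PySem.List.index? fields "evid").getD 0
  let ver_index := (PySem.List.index? fields "ver").getD 0
  let sortedRows := PySem.List.sorted2 rows
    (fun r => r.getD evid_index 0) (fun r => r.getD ver_index 0) true
  (sortedRows.foldl (fun st row =>
      let evid := row.getD evid_index 0
      if PySem.Set.contains st.1 evid then st
      else (PySem.Set.add st.1 evid, st.2 ++ [row]))
    ((PySem.Set.empty : PySem.Set Int), ([] : List (List Int)))).2

-- ===== PORT B =====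
def keep_latest_version_py_alt (rows : List (List Int)) (fields : List String) : List (List Int) :=
  let evid_index := (PySem.List.index? fields "evid").getD 0
  let ver_index := (PySem.List.index? fields "ver").getD 0
  let best := rows.foldl (fun d row =>
      let evid := row.getD evid_index 0
      match PySem.Dict.get? d evid with
      | none => PySem.Dict.insert d evid row
      | some cur =>
          if cur.getD ver_index 0 < row.getD ver_index 0 then PySem.Dict.insert d evid row else d)
    (PySem.Dict.empty : PySem.Dict Int (List Int))
  PySem.List.sorted (PySem.Dict.values best) (fun r => r.getD evid_index 0) true

-- ===== PRECONDITION & SPEC =====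
-- Pre_: Python A raises ValueError when 'evid' or 'ver' is absent from fields, and IndexError
-- when some row is too short for those indices; exactly those inputs are excluded.
def Pre_keep_latest_version_py (rows : List (List Int)) (fields : List String) : Prop :=
  "evid" ∈ fields ∧ "ver" ∈ fields ∧
  ∀ row ∈ rows, (PySem.List.index? fields "evid").getD 0 < row.length ∧
                (PySem.List.index? fields "ver").getD 0 < row.length
instance (rows : List (List Int)) (fields : List String) : Decidable (Pre_keep_latest_version_py rows fields) := by  unfold Pre_keep_latest_version_py; infer_instance

def pvWitness_keep_latest_version_py : List (List Int) × List String :=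
  ([[1, 2], [1, 3], [2, 1]], ["evid", "ver"])

def Spec_keep_latest_version_py (rows : List (List Int)) (fields : List String) (out : List (List Int)) : Prop := out = keep_latest_version_py_alt rows fields
instance (rows : List (List Int)) (fields : List String) (out : List (List Int)) : Decidable (Spec_keep_latest_version_py rows fields out) := by unfold Spec_keep_latest_version_py; infer_instance

-- ===== CLAIM (what is proved, stated in full; the proofs are below) =====
def Claim_equal_keep_latest_version_py : Prop := ∀ (rows : List (List Int)) (fields : List String), Dom_keep_latest_version_py rows fields → Pre_keep_latest_version_py rows fields → Spec_keep_latest_version_py rows fields (keep_latest_version_py rows fields)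

-- ===== LEMMAS AND PROOFS =====

-- The reverse lexicographic comparator sorted2 … true uses (definitional).
def pvBefore (k w : List Int → Int) (x y : List Int) : Bool :=
  decide (k y < k x) || (!decide (k x < k y) && decide (w y < w x))

theorem sorted2_eq_foldl_pvBefore (k w : List Int → Int) (xs : List (List Int)) :
    PySem.List.sorted2 xs k w true
      = xs.foldl (fun acc x => PySem.List.insertBy (pvBefore k w) x acc) [] := rfl

-- "b does not strictly precede a" — the order along the sorted list.
def pvR (k w : List Int → Int) (a b : List Int) : Prop := pvBefore k w b a = false

theorem pvBefore_true_iff (k w : List Int → Int) (x y : List Int) :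
    pvBefore k w x y = true ↔ (k y < k x ∨ (¬ k x < k y ∧ w y < w x)) := by
  simp [pvBefore]

theorem pvBefore_false_iff (k w : List Int → Int) (x y : List Int) :
    pvBefore k w x y = false ↔ ¬ (k y < k x ∨ (¬ k x < k y ∧ w y < w x)) := by
  rw [← pvBefore_true_iff]; simp

-- first-occurrence dedup by key, with a seen set, as in A's loop
def pvDed (k : List Int → Int) (s : PySem.Set Int) : List (List Int) → List (List Int)
  | [] => []
  | x :: xs =>
      if PySem.Set.contains s (k x) then pvDed k s xs
      else x :: pvDed k (PySem.Set.add s (k x)) xs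

theorem foldA_eq_ded (k : List Int → Int) :
    ∀ (l : List (List Int)) (s : PySem.Set Int) (acc : List (List Int)),
      (l.foldl (fun st row =>
          if PySem.Set.contains st.1 (k row) then st
          else (PySem.Set.add st.1 (k row), st.2 ++ [row])) (s, acc)).2
        = acc ++ pvDed k s l := by
  intro l
  induction l with
  | nil => intro s acc; simp [pvDed]
  | cons x xs ih =>
      intro s acc
      simp only [List.foldl_cons]
      rw [pvDed]
      by_cases h : PySem.Set.contains s (k x) = true
      · rw [if_pos h, if_pos h]; exact ih s acc
      · rw [if_neg h, if_neg h, ih]; simp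

theorem max?_append_singleton (w : List Int → Int) (g : List (List Int)) (x : List Int) :
    PySem.List.max? (g ++ [x]) w
      = match PySem.List.max? g w with
        | none => some x
        | some m => if w m < w x then some x else some m := by
  cases hg : PySem.List.max? g w with
  | none =>
      have hgnil := (PySem.List.max?_eq_none_iff g w).mp hg
      subst hgnil
      simp [PySem.List.max?]
  | some m =>
      unfold PySem.List.max? at hg ⊢
      rw [List.foldl_append, hg]
      simp

theorem insertBy_perm (b : List Int → List Int → Bool) (x : List Int) :
    ∀ l : List (List Int), (PySem.List.insertBy b x l).Perm (x :: l) := by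
  intro l
  induction l with
  | nil => simp [PySem.List.insertBy]
  | cons y ys ih =>
      by_cases h : b x y
      · simp [PySem.List.insertBy, h]
      · simp only [PySem.List.insertBy, h, Bool.false_eq_true, if_false]
        exact ((ih.cons y).trans (List.Perm.swap x y ys))

theorem insertBy_find?_of_ne (b : List Int → List Int → Bool) (p : List Int → Bool)
    (x : List Int) (hx : p x = false) :
    ∀ l : List (List Int), (PySem.List.insertBy b x l).find? p = l.find? p := by
  intro l
  induction l with
  | nil => simp [PySem.List.insertBy, hx]
  | cons y ys ih =>
      by_cases h : b x y
      · simp [PySem.List.insertBy, h, List.find?, hx]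
      · by_cases hy : p y
        · simp [PySem.List.insertBy, h, List.find?, hy]
        · simp [PySem.List.insertBy, h, List.find?, hy, ih]

theorem insertBy_pairwise (k w : List Int → Int) (x : List Int) :
    ∀ l : List (List Int), l.Pairwise (pvR k w) →
      (PySem.List.insertBy (pvBefore k w) x l).Pairwise (pvR k w) := by
  intro l
  induction l with
  | nil => intro _; simp [PySem.List.insertBy, List.pairwise_cons]
  | cons y ys ih =>
      intro hp
      rw [List.pairwise_cons] at hp
      obtain ⟨hy, hys⟩ := hp
      by_cases h : pvBefore k w x y
      · -- x :: y :: ys ; x precedes everything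
        simp only [PySem.List.insertBy, h, if_true]
        rw [List.pairwise_cons]
        constructor
        · intro z hz
          rcases List.mem_cons.mp hz with rfl | hz
          · unfold pvR
            rw [pvBefore_true_iff] at h
            rw [pvBefore_false_iff]
            omega
          · have hyz := hy z hz
            unfold pvR at hyz ⊢
            rw [pvBefore_true_iff] at h
            rw [pvBefore_false_iff] at hyz ⊢
            omega
        · rw [List.pairwise_cons]; exact ⟨hy, hys⟩
      · simp only [PySem.List.insertBy, h, Bool.false_eq_true, if_false]
        rw [List.pairwise_cons]
        constructor
        · intro z hz
          have hz2 := (insertBy_perm (pvBefore k w) x ys).mem_iff.mp hz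
          rcases List.mem_cons.mp hz2 with rfl | hz3
          · unfold pvR
            simpa using h
          · exact hy z hz3
        · exact ih hys

theorem insertBy_find?_class (k w : List Int → Int) (x : List Int) :
    ∀ l : List (List Int), l.Pairwise (pvR k w) →
      (PySem.List.insertBy (pvBefore k w) x l).find? (fun r => k r == k x)
        = match l.find? (fun r => k r == k x) with
          | none => some x
          | some m => if w m < w x then some x else some m := by
  intro l
  induction l with
  | nil => intro _; simp [PySem.List.insertBy, List.find?]
  | cons y ys ih =>
      intro hp
      rw [List.pairwise_cons] at hp
      obtain ⟨hy, hys⟩ := hp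
      by_cases h : pvBefore k w x y
      · -- result x :: y :: ys, head matches
        simp only [PySem.List.insertBy, h, if_true]
        rw [List.find?]
        simp only [beq_self_eq_true]
        -- RHS analysis
        cases hf : (y :: ys).find? (fun r => k r == k x) with
        | none => simp
        | some m =>
            have hm : k m = k x := by
              have := List.find?_some hf
              simpa using this
            have hmem := List.mem_of_find?_eq_some hf
            have hwm : w m < w x := by
              rw [pvBefore_true_iff] at h
              rcases List.mem_cons.mp hmem with rfl | hm2
              · omega
              · have := hy m hm2
                unfold pvR at this
                rw [pvBefore_false_iff] at this
                omega
            simp [hwm]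
      · simp only [PySem.List.insertBy, h, Bool.false_eq_true, if_false]
        by_cases hyc : k y = k x
        · -- head y matches on both sides
          have hb : (k y == k x) = true := by simp [hyc]
          rw [List.find?, hb, List.find?, hb]
          have : ¬ w y < w x := by
            have h' : pvBefore k w x y = false := by simpa using h
            rw [pvBefore_false_iff] at h'
            omega
          simp [this]
        · have hb : (k y == k x) = false := by simp [hyc]
          rw [List.find?, hb, List.find?, hb]
          exact ih hys

-- invariant of A's sort: permutation, sortedness, and the first row of each class is its max
theorem sort_invariant (k w : List Int → Int) (rows : List (List Int)) :
    (PySem.List.sorted2 rows k w true).Perm rows ∧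
    (PySem.List.sorted2 rows k w true).Pairwise (pvR k w) ∧
    ∀ c, (PySem.List.sorted2 rows k w true).find? (fun r => k r == c)
          = PySem.List.max? (rows.filter (fun r => k r == c)) w := by
  rw [sorted2_eq_foldl_pvBefore]
  induction rows using List.reverseRecOn with
  | nil => simp [PySem.List.max?]
  | append_singleton l x ih =>
      obtain ⟨hperm, hpw, hfind⟩ := ih
      rw [List.foldl_append]
      simp only [List.foldl_cons, List.foldl_nil]
      refine ⟨?_, insertBy_pairwise k w x _ hpw, ?_⟩
      · exact (insertBy_perm _ x _).trans
          ((hperm.cons x).trans (List.perm_append_comm (l₁ := [x])))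
      · intro c
        by_cases hc : k x = c
        · subst hc
          rw [insertBy_find?_class k w x _ hpw, hfind (k x)]
          rw [List.filter_append]
          simp only [List.filter_cons, List.filter_nil, beq_self_eq_true, if_true]
          rw [max?_append_singleton]
        · have hxc : (fun r => k r == c) x = false := by simp [hc]
          rw [insertBy_find?_of_ne _ _ x hxc, hfind c, List.filter_append]
          simp [hc]

theorem ded_sublist (k : List Int → Int) :
    ∀ (l : List (List Int)) (s : PySem.Set Int), (pvDed k s l).Sublist l := by
  intro l
  induction l with
  | nil => intro s; simp [pvDed]
  | cons x xs ih =>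
      intro s
      by_cases h : PySem.Set.contains s (k x) = true
      · rw [pvDed, if_pos h]; exact (ih s).cons x
      · rw [pvDed, if_neg h]; exact (ih _).cons₂ x

theorem ded_find (k : List Int → Int) :
    ∀ (l : List (List Int)) (s : PySem.Set Int) (x : List Int), x ∈ pvDed k s l →
      k x ∉ s ∧ l.find? (fun r => k r == k x) = some x := by
  intro l
  induction l with
  | nil => intro s x hx; simp [pvDed] at hx
  | cons y ys ih =>
      intro s x hx
      by_cases h : PySem.Set.contains s (k y)
      · rw [pvDed, if_pos h] at hx
        obtain ⟨hns, hf⟩ := ih s x hx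
        have hky : k y ∈ s := by
          simpa [PySem.Set.contains, List.contains_iff_mem] using h
        have hne : k y ≠ k x := fun he => hns (he ▸ hky)
        refine ⟨hns, ?_⟩
        rw [List.find?]
        simp only [show (k y == k x) = false by simp [hne]]
        exact hf
      · rw [pvDed, if_neg h] at hx
        rcases List.mem_cons.mp hx with rfl | hx
        · refine ⟨by simpa [PySem.Set.contains, List.contains_iff_mem] using h, ?_⟩
          rw [List.find?]; simp
        · obtain ⟨hns, hf⟩ := ih _ x hx
          rw [PySem.Set.mem_add] at hns
          have hns1 : k x ∉ s := fun hm => hns (Or.inl hm)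
          have hns2 : k x ≠ k y := fun he => hns (Or.inr he)
          refine ⟨hns1, ?_⟩
          rw [List.find?]
          simp only [show (k y == k x) = false by simp [Ne.symm hns2]]
          exact hf

theorem ded_keys_mem (k : List Int → Int) :
    ∀ (l : List (List Int)) (s : PySem.Set Int) (c : Int),
      c ∈ (pvDed k s l).map k ↔ c ∉ s ∧ c ∈ l.map k := by
  intro l
  induction l with
  | nil => intro s c; simp [pvDed]
  | cons y ys ih =>
      intro s c
      by_cases h : PySem.Set.contains s (k y)
      · have hky : k y ∈ s := by
          simpa [PySem.Set.contains, List.contains_iff_mem] using h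
        rw [pvDed, if_pos h, ih]
        simp only [List.map_cons, List.mem_cons]
        constructor
        · rintro ⟨h1, h2⟩; exact ⟨h1, Or.inr h2⟩
        · rintro ⟨h1, h2 | h2⟩
          · exact absurd (h2 ▸ hky) h1
          · exact ⟨h1, h2⟩
      · have hky : k y ∉ s := by
          simpa [PySem.Set.contains, List.contains_iff_mem] using h
        rw [pvDed, if_neg h]
        simp only [List.map_cons, List.mem_cons, ih, PySem.Set.mem_add]
        constructor
        · rintro (rfl | ⟨h1, h2⟩)
          · exact ⟨hky, Or.inl rfl⟩
          · exact ⟨fun hc => h1 (Or.inl hc), Or.inr h2⟩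
        · rintro ⟨h1, rfl | h2⟩
          · exact Or.inl rfl
          · by_cases hc : c = k y
            · exact Or.inl hc
            · exact Or.inr ⟨fun hc' => (by rcases hc' with hc' | hc'; exact h1 hc'; exact hc hc'), h2⟩

theorem ded_keys_nodup (k : List Int → Int) :
    ∀ (l : List (List Int)) (s : PySem.Set Int), ((pvDed k s l).map k).Nodup := by
  intro l
  induction l with
  | nil => intro s; simp [pvDed]
  | cons y ys ih =>
      intro s
      by_cases h : PySem.Set.contains s (k y) = true
      · rw [pvDed, if_pos h]; exact ih s
      · rw [pvDed, if_neg h]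
        simp only [List.map_cons, List.nodup_cons]
        refine ⟨?_, ih _⟩
        intro hmem
        have := (ded_keys_mem k ys (PySem.Set.add s (k y)) (k y)).mp hmem
        exact this.1 (by rw [PySem.Set.mem_add]; right; rfl)

theorem ded_pairwise_gt (k w : List Int → Int) (l : List (List Int))
    (hp : l.Pairwise (pvR k w)) (s : PySem.Set Int) :
    (pvDed k s l).Pairwise (fun a b => k b < k a) := by
  have h1 : (pvDed k s l).Pairwise (pvR k w) := hp.sublist (ded_sublist k l s)
  have h2 : (pvDed k s l).Pairwise (fun a b => k a ≠ k b) :=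
    List.pairwise_map.mp (ded_keys_nodup k l s)
  refine (h1.and h2).imp ?_
  rintro a b ⟨hr, hne⟩
  unfold pvR at hr
  rw [pvBefore_false_iff] at hr
  omega

-- ===== B side: the dict fold invariant =====

def pvStepB (k w : List Int → Int) (d : PySem.Dict Int (List Int)) (row : List Int) :
    PySem.Dict Int (List Int) :=
  match PySem.Dict.get? d (k row) with
  | none => PySem.Dict.insert d (k row) row
  | some cur => if w cur < w row then PySem.Dict.insert d (k row) row else d

theorem find?_items_of_nodup (its : List (Int × List Int)) (p : Int × List Int)
    (hnod : (its.map Prod.fst).Nodup) (hp : p ∈ its) :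
    its.find? (fun q => q.1 == p.1) = some p := by
  induction its with
  | nil => simp at hp
  | cons q its ih =>
      rcases List.mem_cons.mp hp with rfl | hp'
      · rw [List.find?]; simp
      · simp only [List.map_cons, List.nodup_cons] at hnod
        have hne : q.1 ≠ p.1 := by
          intro he
          exact hnod.1 (he ▸ List.mem_map_of_mem hp')
        rw [List.find?]
        simp only [show (q.1 == p.1) = false by simp [hne]]
        exact ih hnod.2 hp'

theorem get?_eq_none_iff_dict (d : PySem.Dict Int (List Int)) (c : Int) :
    d.get? c = none ↔ c ∉ d.items.map Prod.fst := by
  unfold PySem.Dict.get?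
  simp only [Option.map_eq_none_iff, List.find?_eq_none, beq_iff_eq, List.mem_map]
  constructor
  · rintro h ⟨p, hp, hpc⟩
    exact h p hp hpc
  · intro h p hp hpc
    exact h ⟨p, hp, hpc⟩

theorem items_insert_not_mem (d : PySem.Dict Int (List Int)) (c : Int) (v : List Int)
    (h : c ∉ d.items.map Prod.fst) :
    (d.insert c v).items = d.items ++ [(c, v)] := by
  unfold PySem.Dict.insert
  have hc : d.contains c = false := by
    rw [← Bool.not_eq_true, PySem.Dict.contains_iff_mem_keys]
    simpa [PySem.Dict.keys] using h
  simp [hc]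

theorem items_insert_mem (d : PySem.Dict Int (List Int)) (c : Int) (v : List Int)
    (h : c ∈ d.items.map Prod.fst) :
    (d.insert c v).items = d.items.map (fun p => if p.1 == c then (c, v) else p) := by
  unfold PySem.Dict.insert
  have hc : d.contains c = true := by
    rw [PySem.Dict.contains_iff_mem_keys]
    simpa [PySem.Dict.keys] using h
  simp [hc]

theorem dict_invariant (k w : List Int → Int) (rows : List (List Int)) :
    (∀ c, (rows.foldl (pvStepB k w) PySem.Dict.empty).get? c
            = PySem.List.max? (rows.filter (fun r => k r == c)) w) ∧
    (((rows.foldl (pvStepB k w) PySem.Dict.empty).items.map Prod.fst).Nodup) ∧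
    (∀ p ∈ (rows.foldl (pvStepB k w) PySem.Dict.empty).items,
        PySem.List.max? (rows.filter (fun r => k r == p.1)) w = some p.2) ∧
    (∀ c, c ∈ (rows.foldl (pvStepB k w) PySem.Dict.empty).items.map Prod.fst
            ↔ c ∈ rows.map k) := by
  induction rows using List.reverseRecOn with
  | nil =>
      refine ⟨?_, ?_, ?_, ?_⟩ <;>
        simp [PySem.Dict.empty, PySem.Dict.get?, PySem.List.max?]
  | append_singleton l x ih =>
      obtain ⟨hget, hnod, hitems, hkeys⟩ := ih
      simp only [List.foldl_append, List.foldl_cons, List.foldl_nil]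
      set d := l.foldl (pvStepB k w) PySem.Dict.empty with hd
      have hfx : ∀ c, c ≠ k x → (fun r => k r == c) x = false := by
        intro c hcc; simp [Ne.symm hcc]
      have hfilterne : ∀ c, c ≠ k x →
          (l ++ [x]).filter (fun r => k r == c) = l.filter (fun r => k r == c) := by
        intro c hcc
        rw [List.filter_append]
        simp [hfx c hcc]
      have hfiltereq :
          (l ++ [x]).filter (fun r => k r == k x) = l.filter (fun r => k r == k x) ++ [x] := by
        rw [List.filter_append]
        simp
      cases hc : d.get? (k x) with
      | none =>
          have hnk : k x ∉ d.items.map Prod.fst := (get?_eq_none_iff_dict d (k x)).mp hc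
          have hg : l.filter (fun r => k r == k x) = [] := by
            have h1 := hget (k x)
            rw [hc] at h1
            exact (PySem.List.max?_eq_none_iff _ _).mp h1.symm
          have hkl : k x ∉ l.map k := by
            intro hm
            obtain ⟨r, hr, hkr⟩ := List.mem_map.mp hm
            have : r ∈ l.filter (fun r => k r == k x) :=
              List.mem_filter.mpr ⟨hr, by simp [hkr]⟩
            simp [hg] at this
          have hstep : pvStepB k w d x = d.insert (k x) x := by
            simp only [pvStepB, hc]
          have hitems' : (pvStepB k w d x).items = d.items ++ [(k x, x)] := by
            rw [hstep, items_insert_not_mem d (k x) x hnk]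
          refine ⟨?_, ?_, ?_, ?_⟩
          · intro c
            by_cases hcc : c = k x
            · subst hcc
              rw [hstep, PySem.Dict.get?_insert_self, hfiltereq, hg]
              simp [PySem.List.max?]
            · rw [hstep, PySem.Dict.get?_insert_of_ne d x hcc, hget c, hfilterne c hcc]
          · rw [hitems', List.map_append]
            simp only [List.map_cons, List.map_nil]
            rw [List.nodup_append]
            refine ⟨hnod, List.nodup_singleton _, ?_⟩
            intro a hab b hb
            rw [List.mem_singleton] at hb
            subst hb
            intro he
            exact hnk (he ▸ hab)
          · intro p hp
            rw [hitems'] at hp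
            rcases List.mem_append.mp hp with hp' | hp'
            · have hpne : p.1 ≠ k x := by
                intro he
                exact hnk (he ▸ List.mem_map_of_mem hp')
              rw [hfilterne p.1 hpne]
              exact hitems p hp'
            · have hpx : p = (k x, x) := by simpa using hp'
              subst hpx
              rw [hfiltereq, hg]
              simp [PySem.List.max?]
          · intro c
            rw [hitems', List.map_append, List.map_append]
            simp only [List.mem_append, List.map_cons, List.map_nil]
            rw [hkeys c]
      | some cur =>
          have hcur : PySem.List.max? (l.filter (fun r => k r == k x)) w = some cur := by
            rw [← hget (k x), hc]
          have hck : k x ∈ d.items.map Prod.fst := by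
            by_contra hn
            rw [(get?_eq_none_iff_dict d (k x)).mpr hn] at hc
            simp at hc
          have hc0l : k x ∈ l.map k := (hkeys (k x)).mp hck
          have hmax : PySem.List.max? ((l ++ [x]).filter (fun r => k r == k x)) w
              = if w cur < w x then some x else some cur := by
            rw [hfiltereq, max?_append_singleton, hcur]
          by_cases hlt : w cur < w x
          · have hstep : pvStepB k w d x = d.insert (k x) x := by
              simp only [pvStepB, hc, if_pos hlt]
            have hitems2 : (pvStepB k w d x).items
                = d.items.map (fun p => if p.1 == k x then (k x, x) else p) := by
              rw [hstep, items_insert_mem d (k x) x hck]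
            have hfst : (pvStepB k w d x).items.map Prod.fst = d.items.map Prod.fst := by
              rw [hitems2, List.map_map]
              apply List.map_congr_left
              intro p _
              by_cases hpc : p.1 = k x <;> simp [hpc]
            refine ⟨?_, ?_, ?_, ?_⟩
            · intro c
              by_cases hcc : c = k x
              · subst hcc
                rw [hstep, PySem.Dict.get?_insert_self, hmax, if_pos hlt]
              · rw [hstep, PySem.Dict.get?_insert_of_ne d x hcc, hget c, hfilterne c hcc]
            · rw [hfst]; exact hnod
            · intro p hp
              rw [hitems2] at hp
              obtain ⟨q, hq, rfl⟩ := List.mem_map.mp hp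
              by_cases hqc : q.1 = k x
              · simp only [show (q.1 == k x) = true by simp [hqc], if_true]
                rw [hmax, if_pos hlt]
              · simp only [show (q.1 == k x) = false by simp [hqc], Bool.false_eq_true, if_false]
                rw [hfilterne q.1 hqc]
                exact hitems q hq
            · intro c
              rw [hfst, List.map_append]
              simp only [List.mem_append, List.map_cons, List.map_nil, List.mem_singleton]
              rw [hkeys c]
              constructor
              · exact fun h => Or.inl h
              · rintro (h | rfl)
                · exact h
                · exact hc0l
          · have hstep : pvStepB k w d x = d := by
              simp only [pvStepB, hc, if_neg hlt]
            refine ⟨?_, ?_, ?_, ?_⟩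
            · intro c
              by_cases hcc : c = k x
              · subst hcc
                rw [hstep, hmax, if_neg hlt, ← hcur, hget (k x)]
              · rw [hstep, hget c, hfilterne c hcc]
            · rw [hstep]; exact hnod
            · intro p hp
              rw [hstep] at hp
              by_cases hqc : p.1 = k x
              · have hfind := find?_items_of_nodup d.items p hnod hp
                have hgp : d.get? p.1 = some p.2 := by
                  unfold PySem.Dict.get?
                  rw [hfind]
                  rfl
                rw [hqc] at hgp
                rw [hc] at hgp
                have hpc : p.2 = cur := by
                  injection hgp with h2
                  exact h2.symm
                rw [hqc, hmax, if_neg hlt, hpc]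
              · rw [hfilterne p.1 hqc]
                exact hitems p hp
            · intro c
              rw [hstep, List.map_append]
              simp only [List.mem_append, List.map_cons, List.map_nil, List.mem_singleton]
              rw [hkeys c]
              constructor
              · exact fun h => Or.inl h
              · rintro (h | rfl)
                · exact h
                · exact hc0l

-- ===== assembling the permutation =====

theorem filterMap_map_key (k : List Int → Int) (f : Int → Option (List Int)) :
    ∀ L : List (List Int), (∀ x ∈ L, f (k x) = some x) → (L.map k).filterMap f = L := by
  intro L
  induction L with
  | nil => intro _; simp
  | cons x xs ih =>
      intro h
      simp only [List.map_cons, List.filterMap_cons, h x (List.mem_cons_self)]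
      rw [ih (fun y hy => h y (List.mem_cons_of_mem x hy))]

theorem perm_of_key_fun (k : List Int → Int) (f : Int → Option (List Int))
    (L1 L2 : List (List Int))
    (h1 : ∀ x ∈ L1, f (k x) = some x) (h2 : ∀ x ∈ L2, f (k x) = some x)
    (n1 : (L1.map k).Nodup) (n2 : (L2.map k).Nodup)
    (hm : ∀ c, c ∈ L1.map k ↔ c ∈ L2.map k) : L1.Perm L2 := by
  have hk : (L1.map k).Perm (L2.map k) := (List.perm_ext_iff_of_nodup n1 n2).mpr hm
  have hp := hk.filterMap f
  rwa [filterMap_map_key k f L1 h1, filterMap_map_key k f L2 h2] at hp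

-- the generic core: A's pipeline equals B's pipeline for any key/ver projections
theorem main_equiv (k w : List Int → Int) (rows : List (List Int)) :
    ((PySem.List.sorted2 rows k w true).foldl (fun st row =>
        if PySem.Set.contains st.1 (k row) then st
        else (PySem.Set.add st.1 (k row), st.2 ++ [row]))
      ((PySem.Set.empty : PySem.Set Int), ([] : List (List Int)))).2
    = PySem.List.sorted
        (PySem.Dict.values (rows.foldl (pvStepB k w) PySem.Dict.empty)) k true := by
  obtain ⟨hperm, hpw, hfind⟩ := sort_invariant k w rows
  obtain ⟨hget, hnod, hitems, hkeys⟩ := dict_invariant k w rows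
  set srt := PySem.List.sorted2 rows k w true with hsrt
  set LA := pvDed k PySem.Set.empty srt with hLA
  set d := rows.foldl (pvStepB k w) PySem.Dict.empty with hd
  have hA : ((srt.foldl (fun st row =>
        if PySem.Set.contains st.1 (k row) then st
        else (PySem.Set.add st.1 (k row), st.2 ++ [row]))
      ((PySem.Set.empty : PySem.Set Int), ([] : List (List Int)))).2) = LA := by
    rw [foldA_eq_ded]; rfl
  rw [hA]
  -- key facts about items of d
  have hkey2 : ∀ p ∈ d.items, k p.2 = p.1 := by
    intro p hp
    have h := hitems p hp
    have := PySem.List.max?_mem h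
    have := List.of_mem_filter this
    simpa using this
  have hmapval : (PySem.Dict.values d).map k = d.items.map Prod.fst := by
    unfold PySem.Dict.values
    rw [List.map_map]
    exact List.map_congr_left (fun p hp => hkey2 p hp)
  -- f: the canonical representative of each class
  set f : Int → Option (List Int) :=
    fun c => PySem.List.max? (rows.filter (fun r => k r == c)) w with hf
  have hLAf : ∀ x ∈ LA, f (k x) = some x := by
    intro x hx
    obtain ⟨-, hfd⟩ := ded_find k srt PySem.Set.empty x hx
    show PySem.List.max? (rows.filter (fun r => k r == k x)) w = some x
    rw [← hfind (k x)]
    exact hfd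
  have hLBf : ∀ x ∈ PySem.Dict.values d, f (k x) = some x := by
    intro x hx
    unfold PySem.Dict.values at hx
    obtain ⟨p, hp, rfl⟩ := List.mem_map.mp hx
    show PySem.List.max? (rows.filter (fun r => k r == k p.2)) w = some p.2
    rw [hkey2 p hp]
    exact hitems p hp
  have hLAnod : (LA.map k).Nodup := ded_keys_nodup k srt PySem.Set.empty
  have hLBnod : ((PySem.Dict.values d).map k).Nodup := by rw [hmapval]; exact hnod
  have hmemiff : ∀ c, c ∈ LA.map k ↔ c ∈ (PySem.Dict.values d).map k := by
    intro c
    rw [hmapval, hkeys c, ded_keys_mem]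
    have : c ∈ srt.map k ↔ c ∈ rows.map k := by
      constructor
      · intro h; exact (hperm.map k).mem_iff.mp h
      · intro h; exact (hperm.map k).mem_iff.mpr h
    simp [PySem.Set.empty, this]
  have hLperm : LA.Perm (PySem.Dict.values d) :=
    perm_of_key_fun k f LA (PySem.Dict.values d) hLAf hLBf hLAnod hLBnod hmemiff
  have hLApw : LA.Pairwise (fun a b => k b < k a) := ded_pairwise_gt k w srt hpw _
  exact (PySem.List.sorted_rev_eq_of_perm_of_pairwise_gt _ _ k hLperm hLApw).symm

-- ===== VERDICT (by name: the statement is the Claim_ definition above) =====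
theorem keep_latest_version_py_spec : Claim_equal_keep_latest_version_py := by
  intro rows fields _ _
  unfold Spec_keep_latest_version_py keep_latest_version_py keep_latest_version_py_alt
  exact main_equiv (fun r => r.getD ((PySem.List.index? fields "evid").getD 0) 0)
    (fun r => r.getD ((PySem.List.index? fields "ver").getD 0) 0) rows
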